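-- pv_equiv track=rewrite | github.com/trosa/forca | applications/ForCA/models/6_helpers.py | generate_basic_graph
-- ===== SOURCE A (Python) =====
-- def generate_basic_graph(type,widht, height, min, max, values):
--     '''
--     Gera um gráfico simples com os parâmetros passados, sendo que values é um array de triplas contendo value, label e color.
--     '''
--     graph = 'http://chart.apis.google.com/chart?chxt=y' #Código padrão para montar gráfico de barras
--     graph += '&cht='+type
--     graph += '&chs='+str(widht)+'x'+str(height) #Tamanho do gráfico
--     graph += '&chds='+str(min)+','+str(max) #Min e Max dos dados
--     graph += '&chxr=0,'+str(min)+','+str(max) #Min e Max do eixo Y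
--     graph += '&chd=t:' #Valores
--     for value in values:
--         graph += str(value['value'])+','
--     graph = graph[:len(graph)-1]
--     graph += '&chl=' #Labels, eixo X
--     for value in values:
--         graph += value['label']+'|'
--     graph = graph[:len(graph)-1]
--     graph += '&chco=' #Cores
--     for value in values:
--         graph += value['color']+'|'
--     graph = graph[:len(graph)-1]
--     return graph
-- ===== SOURCE B (Python) =====
-- def generate_basic_graph(type, widht, height, min, max, values):
--     # Each chart parameter is accumulated in a single pass, writing the separator
--     # BEFORE each element; the delimiter after the parameter name (':' resp. '=')
--     # serves as the first element's separator, so an empty section is just the name.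
--     data, labels, colors = '&chd=t', '&chl', '&chco'
--     d_sep, l_sep = ':', '='
--     for v in values:
--         data += d_sep + str(v['value'])
--         labels += l_sep + v['label']
--         colors += l_sep + v['color']
--         d_sep, l_sep = ',', '|'
--     return ('http://chart.apis.google.com/chart?chxt=y'
--             + '&cht=' + type
--             + '&chs=' + str(widht) + 'x' + str(height)
--             + '&chds=' + str(min) + ',' + str(max)
--             + '&chxr=0,' + str(min) + ',' + str(max)
--             + data + labels + colors)
-- ===== Notes on version B (the rewrite author's own statement) =====
-- stated objective: alternative
-- what changed: B builds the three URL sections in one pass over values with the separator written before each element (the ':'/'=' key delimiter doubling as the first separator), instead of A's three separate loops that append trailing separators to one running string and re-slice the whole accumulated URL after each loop; Pre_ excludes inputs where A raises KeyError (a dict missing one of the keys value/label/color).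
import Mathlib
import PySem

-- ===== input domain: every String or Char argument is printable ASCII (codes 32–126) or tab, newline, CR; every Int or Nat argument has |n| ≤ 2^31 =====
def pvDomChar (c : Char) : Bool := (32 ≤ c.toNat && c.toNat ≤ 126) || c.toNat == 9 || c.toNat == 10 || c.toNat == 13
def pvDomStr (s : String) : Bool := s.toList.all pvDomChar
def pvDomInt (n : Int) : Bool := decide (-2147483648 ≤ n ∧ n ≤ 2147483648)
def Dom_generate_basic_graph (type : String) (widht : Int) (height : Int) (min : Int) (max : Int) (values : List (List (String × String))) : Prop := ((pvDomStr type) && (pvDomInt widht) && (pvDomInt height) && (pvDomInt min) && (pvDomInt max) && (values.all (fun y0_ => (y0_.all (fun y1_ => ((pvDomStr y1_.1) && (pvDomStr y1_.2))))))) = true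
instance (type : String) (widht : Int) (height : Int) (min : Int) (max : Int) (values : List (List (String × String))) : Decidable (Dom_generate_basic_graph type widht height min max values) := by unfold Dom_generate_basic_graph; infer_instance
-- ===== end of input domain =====

-- B builds the three URL sections in one pass with the separator written before each element
-- (the ':'/'=' key delimiter doubling as the first separator), instead of A's three loops
-- appending trailing separators to one running string and re-slicing it; same output.

-- ===== PORT A =====
-- string literal → its char list (Python str is ported via List Char)
def pvS (s : String) : List Char := s.toList
-- value['value'] etc.: first-match dict lookup; the KeyError case (missing key) is excluded by Pre_
def pvGet (d : List (String × String)) (k : String) : List Char :=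
  ((PySem.Dict.mk d).getD k "").toList

def generate_basic_graph (type : String) (widht : Int) (height : Int) (min : Int) (max : Int) (values : List (List (String × String))) : String :=
  let g := pvS "http://chart.apis.google.com/chart?chxt=y"
  let g := g ++ (pvS "&cht=" ++ type.toList)
  let g := g ++ (pvS "&chs=" ++ PySem.Int.toChars widht ++ pvS "x" ++ PySem.Int.toChars height)
  let g := g ++ (pvS "&chds=" ++ PySem.Int.toChars min ++ pvS "," ++ PySem.Int.toChars max)
  let g := g ++ (pvS "&chxr=0," ++ PySem.Int.toChars min ++ pvS "," ++ PySem.Int.toChars max)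
  let g := g ++ pvS "&chd=t:"
  let g := values.foldl (fun g v => g ++ (pvGet v "value" ++ [','])) g
  let g := PySem.List.slice g none (some ((g.length : Int) - 1))   -- graph[:len(graph)-1]
  let g := g ++ pvS "&chl="
  let g := values.foldl (fun g v => g ++ (pvGet v "label" ++ ['|'])) g
  let g := PySem.List.slice g none (some ((g.length : Int) - 1))
  let g := g ++ pvS "&chco="
  let g := values.foldl (fun g v => g ++ (pvGet v "color" ++ ['|'])) g
  let g := PySem.List.slice g none (some ((g.length : Int) - 1))
  String.ofList g

-- ===== PORT B =====
def generate_basic_graph_alt (type : String) (widht : Int) (height : Int) (min : Int) (max : Int) (values : List (List (String × String))) : String :=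
  -- state: ((data, labels, colors), (d_sep, l_sep)); one pass over values
  let st := values.foldl
    (fun (st : (List Char × List Char × List Char) × (List Char × List Char)) v =>
      ((st.1.1 ++ st.2.1 ++ pvGet v "value",
        st.1.2.1 ++ st.2.2 ++ pvGet v "label",
        st.1.2.2 ++ st.2.2 ++ pvGet v "color"),
       ([','], ['|'])))
    ((pvS "&chd=t", pvS "&chl", pvS "&chco"), ([':'], ['=']))
  String.ofList
    (pvS "http://chart.apis.google.com/chart?chxt=y"
      ++ (pvS "&cht=" ++ type.toList)
      ++ (pvS "&chs=" ++ PySem.Int.toChars widht ++ pvS "x" ++ PySem.Int.toChars height)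
      ++ (pvS "&chds=" ++ PySem.Int.toChars min ++ pvS "," ++ PySem.Int.toChars max)
      ++ (pvS "&chxr=0," ++ PySem.Int.toChars min ++ pvS "," ++ PySem.Int.toChars max)
      ++ st.1.1 ++ st.1.2.1 ++ st.1.2.2)

-- ===== PRECONDITION & SPEC =====
-- Pre_ excludes exactly the inputs where A raises KeyError: a dict in values missing
-- one of the keys 'value', 'label', 'color' (B raises there too).
def Pre_generate_basic_graph (type : String) (widht : Int) (height : Int) (min : Int) (max : Int) (values : List (List (String × String))) : Prop :=
  ∀ v ∈ values,
    (((PySem.Dict.mk v).get? "value").isSome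
      && ((PySem.Dict.mk v).get? "label").isSome
      && ((PySem.Dict.mk v).get? "color").isSome) = true
instance (type : String) (widht : Int) (height : Int) (min : Int) (max : Int) (values : List (List (String × String))) : Decidable (Pre_generate_basic_graph type widht height min max values) := by unfold Pre_generate_basic_graph; infer_instance

def pvWitness_generate_basic_graph : String × Int × Int × Int × Int × (List (List (String × String))) :=
  ("bvs", 100, 50, 0, 10, [[("value", "3"), ("label", "a"), ("color", "red")]])

def Spec_generate_basic_graph (type : String) (widht : Int) (height : Int) (min : Int) (max : Int) (values : List (List (String × String))) (out : String) : Prop := out = generate_basic_graph_alt type widht height min max values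
instance (type : String) (widht : Int) (height : Int) (min : Int) (max : Int) (values : List (List (String × String))) (out : String) : Decidable (Spec_generate_basic_graph type widht height min max values out) := by unfold Spec_generate_basic_graph; infer_instance

-- ===== CLAIM (what is proved, stated in full; the proofs are below) =====
def Claim_equal_generate_basic_graph : Prop := ∀ (type : String) (widht : Int) (height : Int) (min : Int) (max : Int) (values : List (List (String × String))), Dom_generate_basic_graph type widht height min max values → Pre_generate_basic_graph type widht height min max values → Spec_generate_basic_graph type widht height min max values (generate_basic_graph type widht height min max values)

-- ===== LEMMAS AND PROOFS =====

-- graph[:len(graph)-1] on a nonempty string strips exactly the last character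
lemma pv_chop (g : List Char) (h : g ≠ []) :
    PySem.List.slice g none (some ((g.length : Int) - 1)) = g.dropLast := by
  rw [PySem.List.slice_to _ (by cases g; simp at h; simp)]
  rw [List.dropLast_eq_take]
  congr 1
  omega

-- dropping the last separator of a flatMap of separator-terminated pieces
-- yields the pieces with the separator written BEFORE every element but the first
lemma pv_join_drop {α : Type} (f : α → List Char) (sep : Char) (a : α) (m : List α) :
    ((a :: m).flatMap (fun v => f v ++ [sep])).dropLast
      = f a ++ m.flatMap (fun v => sep :: f v) := by
  induction m generalizing a with
  | nil => simp
  | cons b r ih =>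
    have hne : ((b :: r).flatMap (fun v => f v ++ [sep])) ≠ [] := by simp
    rw [List.flatMap_cons, List.dropLast_append_of_ne_nil hne, ih b]
    simp

-- one of A's loop-then-chop sections, for nonempty values
lemma pv_sect {α : Type} (p q : List Char) (f : α → List Char) (sep : Char) (a : α) (m : List α) :
    PySem.List.slice ((a :: m).foldl (fun g v => g ++ (f v ++ [sep])) (p ++ q)) none
        (some ((((a :: m).foldl (fun g v => g ++ (f v ++ [sep])) (p ++ q)).length : Int) - 1))
      = p ++ q ++ (f a ++ m.flatMap (fun v => sep :: f v)) := by
  rw [PySem.List.foldl_append_eq_flatMap (fun v => f v ++ [sep])]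
  have hfm : (a :: m).flatMap (fun v => f v ++ [sep]) ≠ [] := by simp
  rw [pv_chop _ (by simp), List.dropLast_append_of_ne_nil hfm, pv_join_drop]

-- B's pass after the first element: the separators are fixed at ',' / '|'
lemma pv_tailfold (m : List (List (String × String))) (d l c : List Char) :
    m.foldl
      (fun (st : (List Char × List Char × List Char) × (List Char × List Char)) v =>
        ((st.1.1 ++ st.2.1 ++ pvGet v "value",
          st.1.2.1 ++ st.2.2 ++ pvGet v "label",
          st.1.2.2 ++ st.2.2 ++ pvGet v "color"),
         ([','], ['|'])))
      ((d, l, c), ([','], ['|']))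
      = ((d ++ m.flatMap (fun v => ',' :: pvGet v "value"),
          l ++ m.flatMap (fun v => '|' :: pvGet v "label"),
          c ++ m.flatMap (fun v => '|' :: pvGet v "color")),
         ([','], ['|'])) := by
  induction m generalizing d l c with
  | nil => simp
  | cons a r ih =>
    simp only [List.foldl_cons]
    rw [ih]
    simp [List.append_assoc]

-- ===== VERDICT (by name: the statement is the Claim_ definition above) =====
theorem generate_basic_graph_spec : Claim_equal_generate_basic_graph := by
  intro type widht height min max values _ _
  unfold Spec_generate_basic_graph
  cases values with
  | nil =>
    simp only [generate_basic_graph, generate_basic_graph_alt, List.foldl_nil]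
    rw [pv_chop _ (by simp [pvS]), List.dropLast_append_of_ne_nil (by simp [pvS])]
    rw [pv_chop _ (by simp [pvS]), List.dropLast_append_of_ne_nil (by simp [pvS])]
    rw [pv_chop _ (by simp [pvS]), List.dropLast_append_of_ne_nil (by simp [pvS])]
    simp [show (pvS "&chd=t:").dropLast = pvS "&chd=t" from by decide,
        show (pvS "&chl=").dropLast = pvS "&chl" from by decide,
        show (pvS "&chco=").dropLast = pvS "&chco" from by decide, List.append_assoc]
  | cons a m =>
    simp only [generate_basic_graph]
    rw [pv_sect (f := fun v => pvGet v "value") (sep := ',')]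
    rw [pv_sect (f := fun v => pvGet v "label") (sep := '|')]
    rw [pv_sect (f := fun v => pvGet v "color") (sep := '|')]
    simp only [generate_basic_graph_alt, List.foldl_cons]
    rw [pv_tailfold]
    simp [show pvS "&chd=t" ++ [':'] = pvS "&chd=t:" from by decide,
        show pvS "&chl" ++ ['='] = pvS "&chl=" from by decide,
        show pvS "&chco" ++ ['='] = pvS "&chco=" from by decide, List.append_assoc]
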